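-- pv_equiv track=rewrite | github.com/nikulin-anton/python-contest | contest/part_4/F.py | get_wow_effect
-- ===== SOURCE A (Python) =====
-- def get_wow_effect(string):
--     w, wo, wow = 0, 0, 0
--
--     for i in range(1, len(string)):
--         if string[i] == string[i - 1] == "v":
--             w += 1
--             wow += wo
--         elif string[i] == "o":
--             wo += w
--
--     return wow
-- ===== SOURCE B (Python) =====
-- def get_wow_effect(string):
--     # Pass 1: flag each position that ends a "vv" adjacency (a 'w').
--     flags = []
--     prev = None
--     for c in string:
--         flags.append(1 if prev == "v" and c == "v" else 0)
--         prev = c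
--     total = sum(flags)
--     # Pass 2: for each 'o', multiply the w's strictly before by the w's strictly after.
--     ans = 0
--     left = 0
--     for c, f in zip(string, flags):
--         left += f
--         if c == "o":
--             ans += left * (total - left)
--     return ans
-- ===== Notes on version B (the rewrite author's own statement) =====
-- stated objective: alternative
-- what changed: Replaced A's single forward triple-counter DP (w, wo, wow) by a two-pass scheme: first build the 0/1 table of positions ending a double-v adjacency and its total, then for each letter o add left*(total-left), i.e. two-sided counting instead of running prefix sums of sums.
import Mathlib
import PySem

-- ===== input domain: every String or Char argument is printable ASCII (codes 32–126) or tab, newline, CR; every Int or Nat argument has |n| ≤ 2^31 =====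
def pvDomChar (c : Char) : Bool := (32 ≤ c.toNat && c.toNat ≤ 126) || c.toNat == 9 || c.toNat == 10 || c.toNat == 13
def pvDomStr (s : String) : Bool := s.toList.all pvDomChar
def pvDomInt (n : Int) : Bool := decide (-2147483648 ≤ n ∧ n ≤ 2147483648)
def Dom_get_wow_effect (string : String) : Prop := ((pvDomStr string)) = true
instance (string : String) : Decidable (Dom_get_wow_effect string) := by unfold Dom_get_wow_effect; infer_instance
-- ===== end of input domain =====

-- B replaces A's single forward triple-counter DP by an adjacency-flag table plus
-- two-sided counting per 'o' (left*right); objective: alternative decomposition.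

-- ===== PORT A =====
-- A's index loop 'for i in range(1, len)' reading string[i], string[i-1] becomes the
-- obvious structural recursion carrying the previous character; same state (w, wo, wow).
def loopA : List Char → Char → Int → Int → Int → Int
  | [], _, _, _, wow => wow
  | c :: rest, prev, w, wo, wow =>
    if c = 'v' ∧ prev = 'v' then loopA rest c (w + 1) wo (wow + wo)
    else if c = 'o' then loopA rest c w (wo + w) wow
    else loopA rest c w wo wow

def get_wow_effect (string : String) : Int :=
  match string.toList with
  | [] => 0
  | c :: rest => loopA rest c 0 0 0

-- ===== PORT B =====
-- pass 1 of Source B: the 0/1 flag list marking positions ending a "vv" adjacency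
def flagsOf : List Char → Option Char → List Int
  | [], _ => []
  | c :: rest, prev =>
    (if prev = some 'v' ∧ c = 'v' then (1 : Int) else 0) :: flagsOf rest (some c)

-- pass 2 of Source B: fold over zip(string, flags)
def loopB : List (Char × Int) → Int → Int → Int → Int
  | [], _, _, ans => ans
  | (c, f) :: rest, total, left, ans =>
    loopB rest total (left + f)
      (if c = 'o' then ans + (left + f) * (total - (left + f)) else ans)

def get_wow_effect_alt (string : String) : Int :=
  let cs := string.toList
  let flags := flagsOf cs none
  loopB (cs.zip flags) flags.sum 0 0

-- ===== PRECONDITION & SPEC =====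
def Spec_get_wow_effect (string : String) (out : Int) : Prop := out = get_wow_effect_alt string
instance (string : String) (out : Int) : Decidable (Spec_get_wow_effect string out) := by unfold Spec_get_wow_effect; infer_instance

-- ===== CLAIM (what is proved, stated in full; the proofs are below) =====
def Claim_equal_get_wow_effect : Prop := ∀ (string : String), Dom_get_wow_effect string → Spec_get_wow_effect string (get_wow_effect string)

-- ===== LEMMAS AND PROOFS =====

theorem loopB_shift (l : List (Char × Int)) (t lft a : Int) :
    loopB l t lft a = a + loopB l t lft 0 := by
  induction l generalizing lft a with
  | nil => simp [loopB]
  | cons p rest ih =>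
    obtain ⟨c, f⟩ := p
    simp only [loopB]
    split_ifs with h
    · rw [ih, ih (a := 0 + _)]; ring
    · rw [ih, ih (a := (0 : Int))]

-- main invariant: A's remaining run equals accumulated wow + wo·(pairs still to come)
-- + B's two-sided sum over the same suffix started with left = w, total = final pair count
theorem loopA_eq (l : List Char) (p : Char) (w wo wow : Int) :
    loopA l p w wo wow =
      wow + wo * (flagsOf l (some p)).sum
        + loopB (l.zip (flagsOf l (some p))) (w + (flagsOf l (some p)).sum) w 0 := by
  induction l generalizing p w wo wow with
  | nil => simp [loopA, flagsOf, loopB]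
  | cons c rest ih =>
    by_cases hv : c = 'v' ∧ p = 'v'
    · have : flagsOf (c :: rest) (some p) = 1 :: flagsOf rest (some c) := by
        simp [flagsOf, hv.1, hv.2]
      rw [this]
      simp only [loopA, if_pos hv, List.zip_cons_cons, loopB, List.sum_cons]
      have hco : ¬ c = 'o' := by simp [hv.1]
      rw [if_neg hco, ih]
      ring_nf
    · have hflag : flagsOf (c :: rest) (some p) = 0 :: flagsOf rest (some c) := by
        simp only [flagsOf]
        rw [if_neg (by rintro ⟨h1, h2⟩; exact hv ⟨h2, by simpa using h1⟩)]
      rw [hflag]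
      simp only [loopA, if_neg hv, List.zip_cons_cons, loopB, List.sum_cons, zero_add,
        add_zero]
      by_cases ho : c = 'o'
      · rw [if_pos ho, if_pos ho, ih]
        conv_rhs => rw [loopB_shift]
        ring_nf
      · rw [if_neg ho, if_neg ho, ih]

-- ===== VERDICT (by name: the statement is the Claim_ definition above) =====
theorem get_wow_effect_spec : Claim_equal_get_wow_effect := by
  intro s _
  unfold Spec_get_wow_effect get_wow_effect get_wow_effect_alt
  cases h : s.toList with
  | nil => simp [flagsOf, loopB]
  | cons c rest =>
    have hflag : flagsOf (c :: rest) none = 0 :: flagsOf rest (some c) := by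
      simp [flagsOf]
    simp only [hflag, List.zip_cons_cons, loopB, List.sum_cons, zero_add, add_zero]
    rw [loopA_eq]
    split_ifs with ho <;> simp
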